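-- pv_equiv track=rewrite | github.com/rtshkmr/AOC | 2022/day6/day6_ritesh.py | check_duplicates_in_window
-- ===== SOURCE A (Python) =====
-- def check_duplicates_in_window(window_contents):
--     """
--     Returns true if there are duplicates in the window's contents.
--     """
--     window = {}
--
--     for content in window_contents:
--         if (window.get(content)):
--             return True
--         else:
--             window[content] = 'Exists'
--
--     return False
-- ===== SOURCE B (Python) =====
-- def check_duplicates_in_window(window_contents):
--     """
--     Returns true if there are duplicates in the window's contents.
--     """
--     lst = list(window_contents)
--     return len(set(lst)) != len(lst)
-- ===== Notes on version B (the rewrite author's own statement) =====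
-- stated objective: idiomatic
-- what changed: Replaces the element-by-element dict-membership scan with early return by a whole-structure cardinality comparison len(set(lst)) != len(lst).
import Mathlib
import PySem

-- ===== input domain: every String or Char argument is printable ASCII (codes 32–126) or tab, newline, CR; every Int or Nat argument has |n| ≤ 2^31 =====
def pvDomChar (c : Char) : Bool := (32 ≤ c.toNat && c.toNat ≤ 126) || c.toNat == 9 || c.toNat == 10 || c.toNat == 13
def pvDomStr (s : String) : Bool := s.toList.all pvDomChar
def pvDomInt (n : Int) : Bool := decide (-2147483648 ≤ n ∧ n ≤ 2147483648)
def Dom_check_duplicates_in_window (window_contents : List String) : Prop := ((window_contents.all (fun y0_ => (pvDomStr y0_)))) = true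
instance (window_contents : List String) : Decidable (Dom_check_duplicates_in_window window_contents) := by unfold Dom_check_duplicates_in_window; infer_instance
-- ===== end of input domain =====

-- B replaces A's element-by-element dict-membership scan (early return) by an
-- idiomatic whole-structure cardinality comparison len(set(lst)) != len(lst).


-- ===== PORT A =====
-- the for-loop with its early 'return True'; 'if window.get(content)' is Python
-- truthiness of the looked-up value (None or "" falsy)
def check_duplicates_in_window_loop (window : PySem.Dict String String) :
    List String → Bool
  | [] => false
  | content :: rest =>
    if ((window.get? content).getD "") ≠ "" then true
    else check_duplicates_in_window_loop (window.insert content "Exists") rest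

def check_duplicates_in_window (window_contents : List String) : Bool :=
  check_duplicates_in_window_loop PySem.Dict.empty window_contents

-- ===== PORT B =====
def check_duplicates_in_window_alt (window_contents : List String) : Bool :=
  decide (PySem.Set.len (PySem.Set.ofList window_contents) ≠ (window_contents.length : Int))

-- ===== PRECONDITION & SPEC =====
def Spec_check_duplicates_in_window (window_contents : List String) (out : Bool) : Prop := out = check_duplicates_in_window_alt window_contents
instance (window_contents : List String) (out : Bool) : Decidable (Spec_check_duplicates_in_window window_contents out) := by unfold Spec_check_duplicates_in_window; infer_instance

-- ===== CLAIM (what is proved, stated in full; the proofs are below) =====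
def Claim_equal_check_duplicates_in_window : Prop := ∀ (window_contents : List String), Dom_check_duplicates_in_window window_contents → Spec_check_duplicates_in_window window_contents (check_duplicates_in_window window_contents)

-- ===== LEMMAS AND PROOFS =====

-- A's loop returns true iff the remaining list has a duplicate or hits a key
-- already stored with a truthy value.
lemma loop_iff (l : List String) :
    ∀ (d : PySem.Dict String String),
      check_duplicates_in_window_loop d l = true ↔
        ¬ l.Nodup ∨ ∃ x ∈ l, ((d.get? x).getD "") ≠ "" := by
  induction l with
  | nil => intro d; simp [check_duplicates_in_window_loop]
  | cons c rest ih =>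
    intro d
    simp only [check_duplicates_in_window_loop]
    by_cases hc : ((d.get? c).getD "") ≠ ""
    · simp [hc]
    · simp only [if_neg hc, ih]
      constructor
      · rintro (hnd | ⟨x, hx, hxt⟩)
        · exact Or.inl (by simp [List.nodup_cons]; tauto)
        · rw [PySem.Dict.get?_insert] at hxt
          by_cases hxc : x = c
          · exact Or.inl (by simp [List.nodup_cons]; intro h; exact absurd (hxc ▸ hx) h)
          · exact Or.inr ⟨x, List.mem_cons_of_mem _ hx, by simpa [hxc] using hxt⟩
      · rintro (hnd | ⟨x, hx, hxt⟩)
        · rw [List.nodup_cons] at hnd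
          push Not at hnd
          by_cases hm : c ∈ rest
          · exact Or.inr ⟨c, hm, by simp⟩
          · exact Or.inl (hnd hm)
        · rcases List.mem_cons.mp hx with rfl | hx'
          · exact absurd hxt hc
          · exact Or.inr ⟨x, hx', by rw [PySem.Dict.get?_insert]; split_ifs with h <;> simp_all⟩

lemma portA_eq (w : List String) :
    check_duplicates_in_window w = decide (¬ w.Nodup) := by
  have h := loop_iff w PySem.Dict.empty
  simp only [PySem.Dict.get?_empty] at h
  simp only [check_duplicates_in_window]
  cases hE : check_duplicates_in_window_loop PySem.Dict.empty w <;>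
    simp [hE] at h ⊢ <;> tauto

lemma ofList_length_eq_dedup (w : List String) :
    (PySem.Set.ofList w).length = w.dedup.length := by
  have hp : (PySem.Set.ofList w).Perm w.dedup := by
    rw [List.perm_ext_iff_of_nodup (PySem.Set.nodup_ofList w) w.nodup_dedup]
    intro x
    simp [PySem.Set.mem_ofList]
  exact hp.length_eq

lemma portB_eq (w : List String) :
    check_duplicates_in_window_alt w = decide (¬ w.Nodup) := by
  simp only [check_duplicates_in_window_alt, PySem.Set.len, ofList_length_eq_dedup]
  rcases eq_or_ne w.dedup.length w.length with h | h
  · have hd : w.dedup = w := w.dedup_sublist.eq_of_length h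
    have : w.Nodup := by rw [← hd]; exact w.nodup_dedup
    simp [h, this]
  · have : ¬ w.Nodup := fun hn => h (by rw [List.Nodup.dedup hn])
    simp only [decide_eq_true this]
    simp [h]

-- ===== VERDICT (by name: the statement is the Claim_ definition above) =====
theorem check_duplicates_in_window_spec : Claim_equal_check_duplicates_in_window := by
  intro w _
  unfold Spec_check_duplicates_in_window
  rw [portA_eq, portB_eq]
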